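-- pv_equiv track=rewrite | github.com/MrVJPman/Teaching | ICS4U1/Searching Algorithms/ReverseLinearSearchInteger.py | ReverseLinearSearchInt
-- ===== SOURCE A (Python) =====
-- def ReverseLinearSearchInt(search_list, search_value):
--     i = len(search_list)-1
--     while True:
--         if i < 0:
--             return -1
--         elif search_list[i] == search_value:
--             return i
--         else:
--             i = i - 1
-- ===== SOURCE B (Python) =====
-- def ReverseLinearSearchInt(search_list, search_value):
--     result = -1
--     for index, element in enumerate(search_list):
--         if element == search_value:
--             result = index
--     return result
-- ===== Notes on version B (the rewrite author's own statement) =====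
-- stated objective: alternative
-- what changed: Replaces the backward early-exiting while loop indexing the list with a single forward enumerate pass that keeps a running last-matching-index accumulator.
import Mathlib
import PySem

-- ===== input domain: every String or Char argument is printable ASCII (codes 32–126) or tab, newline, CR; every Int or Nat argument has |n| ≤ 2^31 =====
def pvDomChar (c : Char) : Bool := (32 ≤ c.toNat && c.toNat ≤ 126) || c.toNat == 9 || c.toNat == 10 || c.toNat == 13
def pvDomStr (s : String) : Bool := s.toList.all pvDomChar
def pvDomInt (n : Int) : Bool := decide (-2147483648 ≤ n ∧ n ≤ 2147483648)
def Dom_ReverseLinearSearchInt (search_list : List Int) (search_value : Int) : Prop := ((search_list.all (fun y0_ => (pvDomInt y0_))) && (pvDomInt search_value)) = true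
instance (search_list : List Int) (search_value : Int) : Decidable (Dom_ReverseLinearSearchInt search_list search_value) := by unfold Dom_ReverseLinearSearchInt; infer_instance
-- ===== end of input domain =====

-- B replaces A's backward early-exiting scan with a forward enumerate pass keeping a
-- running last-matching-index accumulator (alternative decomposition, same O(n) cost).

-- ===== PORT A =====
-- A's while loop: i counts down from len-1; fuel n = i+1, so n = 0 means i < 0 (return -1).
-- search_list[i] with 0 ≤ i < len is always in range, so the 'none' branch is unreachable.
def pvGoA (xs : List Int) (v : Int) : Nat → Int
  | 0 => -1
  | n + 1 =>
    match PySem.List.pyGet? xs (n : Int) with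
    | some x => if x = v then (n : Int) else pvGoA xs v n
    | none => -1

def ReverseLinearSearchInt (search_list : List Int) (search_value : Int) : Int :=
  pvGoA search_list search_value search_list.length

-- ===== PORT B =====
def ReverseLinearSearchInt_alt (search_list : List Int) (search_value : Int) : Int :=
  (PySem.List.enumerate search_list 0).foldl
    (fun result p => if p.2 = search_value then p.1 else result) (-1)

-- ===== PRECONDITION & SPEC =====
def Spec_ReverseLinearSearchInt (search_list : List Int) (search_value : Int) (out : Int) : Prop := out = ReverseLinearSearchInt_alt search_list search_value
instance (search_list : List Int) (search_value : Int) (out : Int) : Decidable (Spec_ReverseLinearSearchInt search_list search_value out) := by unfold Spec_ReverseLinearSearchInt; infer_instance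

-- ===== CLAIM (what is proved, stated in full; the proofs are below) =====
def Claim_equal_ReverseLinearSearchInt : Prop := ∀ (search_list : List Int) (search_value : Int), Dom_ReverseLinearSearchInt search_list search_value → Spec_ReverseLinearSearchInt search_list search_value (ReverseLinearSearchInt search_list search_value)

-- ===== LEMMAS AND PROOFS =====

theorem pvGoA_append (xs ys : List Int) (v : Int) (n : Nat) (hn : n ≤ xs.length) :
    pvGoA (xs ++ ys) v n = pvGoA xs v n := by
  induction n with
  | zero => rfl
  | succ m ih =>
    have hm : m < xs.length := by omega
    simp only [pvGoA, PySem.List.pyGet?_natCast, List.getElem?_append_left hm,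
      ih (by omega)]

theorem enumerate_append_singleton (xs : List Int) (x : Int) (s : Int) :
    PySem.List.enumerate (xs ++ [x]) s
      = PySem.List.enumerate xs s ++ [(s + xs.length, x)] := by
  induction xs generalizing s with
  | nil => simp [PySem.List.enumerate_cons, PySem.List.enumerate_nil]
  | cons y ys ih =>
    simp only [List.cons_append, PySem.List.enumerate_cons, ih, List.length_cons]
    congr 2
    push_cast
    ring

theorem main_eq (xs : List Int) (v : Int) :
    pvGoA xs v xs.length
      = (PySem.List.enumerate xs 0).foldl
          (fun result p => if p.2 = v then p.1 else result) (-1) := by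
  induction xs using List.reverseRecOn with
  | nil => simp [pvGoA, PySem.List.enumerate_nil]
  | append_singleton ys y ih =>
    rw [enumerate_append_singleton, List.foldl_append]
    have hlen : (ys ++ [y]).length = ys.length + 1 := by simp
    rw [hlen]
    simp only [pvGoA, PySem.List.pyGet?_append_length, List.foldl_cons, List.foldl_nil]
    rw [pvGoA_append ys [y] v ys.length le_rfl, ih]
    by_cases h : y = v <;> simp [h]

-- ===== VERDICT (by name: the statement is the Claim_ definition above) =====
theorem ReverseLinearSearchInt_spec : Claim_equal_ReverseLinearSearchInt := by
  intro xs v _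
  unfold Spec_ReverseLinearSearchInt ReverseLinearSearchInt ReverseLinearSearchInt_alt
  exact main_eq xs v
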